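-- pv_equiv track=rewrite | github.com/S0S-90/useful_scripts | mathematical_function_collection.py | zahlen_rechts_unten
-- ===== SOURCE A (Python) =====
-- def zahlen_rechts_unten(seitenlaenge):
--     """gibt die Zahlen der Diagonalenhälfte rechts unten aus einer spiralförmigen Zahlenmatrix der Seitenlänge seitenlaenge als Liste aus (ohne 1)"""
--     anzahl = int((seitenlaenge-1)/2)
--     zahl = 1
--     summand = 8
--     zahlen = []
--     for i in range(anzahl):
--         zahl = zahl + summand
--         zahlen.append(zahl)
--         summand = summand + 8
--     return zahlen
-- ===== SOURCE B (Python) =====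
-- def zahlen_rechts_unten(seitenlaenge):
--     """gibt die Zahlen der Diagonalenhälfte rechts unten aus einer spiralförmigen Zahlenmatrix der Seitenlänge seitenlaenge als Liste aus (ohne 1)"""
--     anzahl = int((seitenlaenge-1)/2)
--     return [(2*i + 3)**2 for i in range(anzahl)]
-- ===== Notes on version B (the rewrite author's own statement) =====
-- stated objective: simpler
-- what changed: The running-sum state (zahl accumulated by a summand that itself grows by 8 each step) is replaced by a closed form: each element is computed independently as the square of an odd number, with no state carried between iterations.
import Mathlib
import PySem

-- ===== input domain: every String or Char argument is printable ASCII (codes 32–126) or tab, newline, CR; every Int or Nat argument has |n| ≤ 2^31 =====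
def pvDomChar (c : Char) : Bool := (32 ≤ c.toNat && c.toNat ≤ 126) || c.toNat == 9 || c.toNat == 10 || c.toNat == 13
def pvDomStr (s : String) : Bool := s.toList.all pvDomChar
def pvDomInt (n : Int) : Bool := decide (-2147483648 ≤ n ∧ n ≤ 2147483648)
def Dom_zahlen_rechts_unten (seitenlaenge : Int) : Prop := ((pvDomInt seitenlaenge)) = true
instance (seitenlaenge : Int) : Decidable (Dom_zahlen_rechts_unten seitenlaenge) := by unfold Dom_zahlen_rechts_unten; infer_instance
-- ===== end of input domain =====

-- ===== PORT A =====
-- B replaces A's running-sum state with a closed form (each element an odd square, per index); return values equal on Dom.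
-- int((seitenlaenge-1)/2): float division by 2 is exact for |seitenlaenge| ≤ 2^31+1 and int() truncates
-- toward zero, so on Dom it equals Int.tdiv (truncating division).
def zahlen_rechts_unten (seitenlaenge : Int) : List Int :=
  let anzahl : Int := (seitenlaenge - 1).tdiv 2
  let st := (PySem.List.pyRange 0 anzahl 1).foldl
      (fun (st : Int × Int × List Int) _ =>
        (st.1 + st.2.1, st.2.1 + 8, st.2.2 ++ [st.1 + st.2.1]))
      (1, 8, [])
  st.2.2

-- ===== PORT B =====
def zahlen_rechts_unten_alt (seitenlaenge : Int) : List Int :=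
  let anzahl : Int := (seitenlaenge - 1).tdiv 2
  (PySem.List.pyRange 0 anzahl 1).map (fun i => (2*i + 3)^2)

-- ===== PRECONDITION & SPEC =====
def Spec_zahlen_rechts_unten (seitenlaenge : Int) (out : List Int) : Prop := out = zahlen_rechts_unten_alt seitenlaenge
instance (seitenlaenge : Int) (out : List Int) : Decidable (Spec_zahlen_rechts_unten seitenlaenge out) := by unfold Spec_zahlen_rechts_unten; infer_instance

-- ===== CLAIM (what is proved, stated in full; the proofs are below) =====
def Claim_equal_zahlen_rechts_unten : Prop := ∀ (seitenlaenge : Int), Dom_zahlen_rechts_unten seitenlaenge → Spec_zahlen_rechts_unten seitenlaenge (zahlen_rechts_unten seitenlaenge)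

-- ===== LEMMAS AND PROOFS =====

lemma loop_state (n : Nat) :
    (List.range n).foldl
      (fun (st : Int × Int × List Int) _ =>
        (st.1 + st.2.1, st.2.1 + 8, st.2.2 ++ [st.1 + st.2.1]))
      (1, 8, [])
    = ((2*(n:Int)+1)^2, 8*((n:Int)+1), (List.range n).map (fun i : Nat => (2*(i:Int) + 3)^2)) := by
  induction n with
  | zero => simp
  | succ m ih =>
    rw [List.range_succ, List.foldl_append, ih]
    simp only [List.foldl_cons, List.foldl_nil, List.map_append, List.map_cons, List.map_nil]
    refine Prod.ext ?_ (Prod.ext ?_ ?_) <;> simp <;> ring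

-- ===== VERDICT (by name: the statement is the Claim_ definition above) =====
theorem zahlen_rechts_unten_spec : Claim_equal_zahlen_rechts_unten := by
  intro n _
  unfold Spec_zahlen_rechts_unten zahlen_rechts_unten zahlen_rechts_unten_alt
  simp only [PySem.List.pyRange_one, List.foldl_map, List.map_map, sub_zero, zero_add,
    loop_state]
  simp
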